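-- pv_equiv track=rewrite | github.com/noahostle/SPEAR | Attacks/full_key_recovery/ladder/ladder.py | extract_upper_transport_signature
-- ===== SOURCE A (Python) =====
-- from typing import Dict, List, Optional, Sequence, Tuple
--
-- def canonical_shift_tuple(values: Sequence[int], modulus: int) -> Tuple[int, ...]:
--     unique = sorted({int(value) % modulus for value in values})
--     if not unique:
--         return ()
--     best: Optional[Tuple[int, ...]] = None
--     for base in unique:
--         candidate = tuple(sorted(((value - base) % modulus) for value in unique))
--         if best is None or candidate < best:
--             best = candidate
--     assert best is not None
--     return best
--
-- def cyclic_distance(value_a: int, value_b: int, modulus: int) -> int: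
--     diff = (int(value_a) - int(value_b)) % modulus
--     alt = (int(value_b) - int(value_a)) % modulus
--     return min(diff, alt)
--
-- def support_profile(values: Sequence[int], modulus: int) -> Dict[str, object]:
--     unique = sorted({int(value) % modulus for value in values})
--     distances: List[int] = []
--     for idx, lhs in enumerate(unique):
--         for rhs in unique[idx + 1:]:
--             distances.append(cyclic_distance(lhs, rhs, modulus))
--     distances.sort()
--     return {
--         "support": tuple(unique),
--         "size": len(unique),
--         "distances": tuple(distances),
--     }
--
-- def extract_upper_transport_signature(table: Sequence[int], low: int) -> Dict[str, object]:
--     rows = [table[(row << 8):((row + 1) << 8)] for row in range(0x100)]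
--     upper_profiles = []
--     low_profiles = []
--     low &= 0xFF
--     for row in rows:
--         shifted = [((int(value) + low) & 0xFFFF) >> 8 for value in row]
--         upper_profiles.append(support_profile(shifted, 0x100))
--         low_profiles.append(support_profile([value & 0x0F for value in shifted], 0x10))
--     upper_canonical = [canonical_shift_tuple(item["support"], 0x100) for item in upper_profiles]
--     low_canonical = [canonical_shift_tuple(item["support"], 0x10) for item in low_profiles]
--     return {
--         "upper_support_multiset": sorted(item["support"] for item in upper_profiles),
--         "upper_canonical_multiset": sorted(upper_canonical),
--         "low_nibble_support_multiset": sorted(item["support"] for item in low_profiles),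
--         "low_nibble_canonical_multiset": sorted(low_canonical),
--     }
-- ===== SOURCE B (Python) =====
-- def _support(values, m):
--     # sorted distinct residues by scanning 0..m-1 against a membership set (no sort call)
--     s = set(values)
--     return [v for v in range(m) if v in s]
--
-- def _canonical(unique, m):
--     # canonical shift = cumulative sums of the lexicographically minimal rotation
--     # of the circular gap word of the support
--     if not unique:
--         return ()
--     gaps = [b - a for a, b in zip(unique, unique[1:])] + [m + unique[0] - unique[-1]]
--     best = min(gaps[i:] + gaps[:i] for i in range(len(gaps)))
--     out, acc = [0], 0
--     for g in best[:-1]: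
--         acc += g
--         out.append(acc)
--     return tuple(out)
--
-- def extract_upper_transport_signature(table, low):
--     low &= 0xFF
--     rows = [[((v + low) & 0xFFFF) >> 8 for v in table[r << 8:(r + 1) << 8]]
--             for r in range(0x100)]
--     up = [_support(s, 0x100) for s in rows]
--     lo = [_support([v & 0x0F for v in s], 0x10) for s in rows]
--     return {
--         "upper_support_multiset": sorted(map(tuple, up)),
--         "upper_canonical_multiset": sorted(_canonical(u, 0x100) for u in up),
--         "low_nibble_support_multiset": sorted(map(tuple, lo)),
--         "low_nibble_canonical_multiset": sorted(_canonical(l, 0x10) for l in lo),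
--     }
-- ===== Notes on version B (the rewrite author's own statement) =====
-- stated objective: faster
-- what changed: B canonicalises each support via the cumulative sums of the lexicographically minimal rotation of its circular gap word (instead of A's per-base re-normalise-sort-and-track-best loop), builds each sorted support by scanning 0..m-1 against a membership set instead of sorted(set(...)), and never computes A's discarded O(u^2) pairwise cyclic-distance profiles.
import Mathlib
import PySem

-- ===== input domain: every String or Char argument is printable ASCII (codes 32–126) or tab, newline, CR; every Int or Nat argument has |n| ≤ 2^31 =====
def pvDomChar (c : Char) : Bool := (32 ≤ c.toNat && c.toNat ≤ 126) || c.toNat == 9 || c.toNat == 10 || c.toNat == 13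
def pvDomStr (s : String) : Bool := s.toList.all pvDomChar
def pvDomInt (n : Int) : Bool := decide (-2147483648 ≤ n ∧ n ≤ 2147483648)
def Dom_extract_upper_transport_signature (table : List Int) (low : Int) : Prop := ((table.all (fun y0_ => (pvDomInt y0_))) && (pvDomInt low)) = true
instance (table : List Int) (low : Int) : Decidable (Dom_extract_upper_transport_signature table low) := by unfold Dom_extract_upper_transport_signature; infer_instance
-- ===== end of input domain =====

-- B replaces A's per-base renormalise-and-sort canonicalisation by cumulative sums of the
-- lexicographically minimal rotation of the support's circular gap word, scans 0..m-1 against a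
-- membership set for the sorted support, and drops A's unused pairwise-distance profiles (faster).

-- ===== PORT A =====
def pvCanonicalShiftTuple (values : List Int) (modulus : Int) : List Int :=
  let unique := PySem.List.sorted (PySem.Set.ofList (values.map (fun v => PySem.Int.mod v modulus))) (fun x => x) false
  if unique = [] then []
  else
    (unique.foldl (fun (best : Option (List Int)) base =>
      let candidate := PySem.List.sorted (unique.map (fun v => PySem.Int.mod (v - base) modulus)) (fun x => x) false
      match best with
      | none => some candidate
      | some b => if candidate < b then some candidate else some b) none).getD []

def pvCyclicDistance (a b m : Int) : Int :=
  min (PySem.Int.mod (a - b) m) (PySem.Int.mod (b - a) m)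

structure PvProfile where
  support : List Int
  size : Int
  distances : List Int
deriving DecidableEq, Repr

def pvSupportProfile (values : List Int) (modulus : Int) : PvProfile :=
  let unique := PySem.List.sorted (PySem.Set.ofList (values.map (fun v => PySem.Int.mod v modulus))) (fun x => x) false
  let distances := (PySem.List.enumerate unique 0).foldl (fun ds p =>
      (PySem.List.slice unique (some (p.1 + 1)) none).foldl
        (fun ds2 rhs => ds2 ++ [pvCyclicDistance p.2 rhs modulus]) ds) []
  ⟨unique, PySem.List.len unique, PySem.List.sorted distances (fun x => x) false⟩

def extract_upper_transport_signature (table : List Int) (low : Int) : List (String × List (List Int)) :=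
  let rows := (PySem.List.pyRange 0 256 1).map (fun (row : Int) =>
      PySem.List.slice table (some (row <<< (8:Nat))) (some ((row + 1) <<< (8:Nat))))
  let low2 := PySem.Int.band low 255
  let profiles := rows.foldl (fun (acc : List PvProfile × List PvProfile) row =>
      let shifted := row.map (fun v => (PySem.Int.band (v + low2) 65535) >>> (8:Nat))
      (acc.1 ++ [pvSupportProfile shifted 256],
       acc.2 ++ [pvSupportProfile (shifted.map (fun v => PySem.Int.band v 15)) 16])) ([], [])
  let upper_profiles := profiles.1
  let low_profiles := profiles.2
  let upper_canonical := upper_profiles.map (fun item => pvCanonicalShiftTuple item.support 256)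
  let low_canonical := low_profiles.map (fun item => pvCanonicalShiftTuple item.support 16)
  [("upper_support_multiset", PySem.List.sorted (upper_profiles.map (·.support)) (fun x => x) false),
   ("upper_canonical_multiset", PySem.List.sorted upper_canonical (fun x => x) false),
   ("low_nibble_support_multiset", PySem.List.sorted (low_profiles.map (·.support)) (fun x => x) false),
   ("low_nibble_canonical_multiset", PySem.List.sorted low_canonical (fun x => x) false)]

-- ===== PORT B =====
-- _support: sorted distinct residues by scanning 0..m-1 against a membership set
def pvSupportB (values : List Int) (m : Int) : List Int :=
  let s := PySem.Set.ofList values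
  (PySem.List.pyRange 0 m 1).filter (fun v => PySem.Set.contains s v)

-- _canonical: cumulative sums of the lexicographically minimal rotation of the circular gap word
def pvCanonicalB (unique : List Int) (m : Int) : List Int :=
  if unique = [] then []
  else
    let gaps := ((List.zip unique (PySem.List.slice unique (some 1) none)).map (fun p => p.2 - p.1))
        ++ [m + (PySem.List.pyGet? unique 0).getD 0 - (PySem.List.pyGet? unique (-1)).getD 0]
    let best := (PySem.List.min? ((PySem.List.pyRange 0 ((gaps.length : Nat) : Int) 1).map (fun i =>
        PySem.List.slice gaps (some i) none ++ PySem.List.slice gaps none (some i))) (fun x => x)).getD []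
    ((PySem.List.slice best none (some (-1))).foldl
        (fun (st : List Int × Int) g => (st.1 ++ [st.2 + g], st.2 + g)) ([0], 0)).1

def extract_upper_transport_signature_alt (table : List Int) (low : Int) : List (String × List (List Int)) :=
  let low2 := PySem.Int.band low 255
  let rows := (PySem.List.pyRange 0 256 1).map (fun (r : Int) =>
      (PySem.List.slice table (some (r <<< (8:Nat))) (some ((r + 1) <<< (8:Nat)))).map
        (fun v => (PySem.Int.band (v + low2) 65535) >>> (8:Nat)))
  let up := rows.map (fun s => pvSupportB s 256)
  let lo := rows.map (fun s => pvSupportB (s.map (fun v => PySem.Int.band v 15)) 16)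
  [("upper_support_multiset", PySem.List.sorted up (fun x => x) false),
   ("upper_canonical_multiset", PySem.List.sorted (up.map (fun u => pvCanonicalB u 256)) (fun x => x) false),
   ("low_nibble_support_multiset", PySem.List.sorted lo (fun x => x) false),
   ("low_nibble_canonical_multiset", PySem.List.sorted (lo.map (fun l => pvCanonicalB l 16)) (fun x => x) false)]

-- ===== PRECONDITION & SPEC =====
def Spec_extract_upper_transport_signature (table : List Int) (low : Int) (out : List (String × List (List Int))) : Prop := out = extract_upper_transport_signature_alt table low
instance (table : List Int) (low : Int) (out : List (String × List (List Int))) : Decidable (Spec_extract_upper_transport_signature table low out) := by unfold Spec_extract_upper_transport_signature; infer_instance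

-- ===== CLAIM (what is proved, stated in full; the proofs are below) =====
def Claim_equal_extract_upper_transport_signature : Prop := ∀ (table : List Int) (low : Int), Dom_extract_upper_transport_signature table low → Spec_extract_upper_transport_signature table low (extract_upper_transport_signature table low)

-- ===== LEMMAS AND PROOFS =====

-- Python's a & b with 0 <= b lands in [0, b].
lemma pvBandBounds (a : Int) (b : Nat) : 0 ≤ PySem.Int.band a (b : Int) ∧ PySem.Int.band a (b : Int) ≤ b := by
  unfold PySem.Int.band
  split_ifs with h1 h2 h2 <;> simp_all
  exact_mod_cast Nat.and_le_right

-- the shifted values ((v + low) & 0xFFFF) >> 8 lie in [0, 256)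
lemma pvShiftedBounds (x : Int) : 0 ≤ (PySem.Int.band x 65535) >>> (8:Nat) ∧ (PySem.Int.band x 65535) >>> (8:Nat) < 256 := by
  have h := pvBandBounds x 65535
  rw [Int.shiftRight_eq_div_pow]
  norm_num at h ⊢
  omega

lemma pvModId (x m : Int) (h0 : 0 ≤ x) (h1 : x < m) : PySem.Int.mod x m = x := by
  rw [PySem.Int.mod_eq_emod_of_pos (a := x) (by omega : (0:Int) < m)]
  exact Int.emod_eq_of_lt h0 h1

lemma pvModShift (x m : Int) (h0 : -m < x) (h1 : x < 0) : PySem.Int.mod x m = x + m := by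
  have hm : (0:Int) < m := by omega
  rw [PySem.Int.mod_eq_emod_of_pos (a := x) hm]
  rw [← Int.add_emod_right x m, Int.emod_eq_of_lt (by omega) (by omega)]

lemma pvMapModEq (s : List Int) (m : Int) (hb : ∀ x ∈ s, 0 ≤ x ∧ x < m) :
    s.map (fun v => PySem.Int.mod v m) = s := by
  conv_rhs => rw [← List.map_id s]
  exact List.map_congr_left (fun x hx => pvModId x m (hb x hx).1 (hb x hx).2)

-- elements of B's support scan
lemma pvSupportB_bounds (s : List Int) (m : Int) :
    ∀ x ∈ pvSupportB s m, 0 ≤ x ∧ x < m := by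
  intro x hx
  unfold pvSupportB at hx
  simp only [List.mem_filter] at hx
  have := (PySem.List.mem_pyRange_one).mp hx.1
  exact this

lemma pvSupportB_pairwise (s : List Int) (m : Int) :
    (pvSupportB s m).Pairwise (· < ·) := by
  unfold pvSupportB
  exact (PySem.List.pairwise_lt_pyRange_one (a := 0) (b := m)).filter _

-- sorted(set(x % m for x in s)) is exactly B's range scan when s already lies in [0, m)
lemma pvSupportScan (s : List Int) (m : Int) (hb : ∀ x ∈ s, 0 ≤ x ∧ x < m) :
    PySem.List.sorted (PySem.Set.ofList (s.map (fun v => PySem.Int.mod v m))) (fun x => x) false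
      = pvSupportB s m := by
  rw [pvMapModEq s m hb]
  apply PySem.List.sorted_eq_of_perm_of_pairwise_lt
  · refine (List.perm_ext_iff_of_nodup ?_ ?_).mpr ?_
    · unfold pvSupportB
      exact (PySem.List.nodup_pyRange_one (a := 0) (b := m)).filter _
    · exact PySem.Set.nodup_ofList s
    · intro a
      unfold pvSupportB
      simp only [List.mem_filter, PySem.List.mem_pyRange_one, PySem.Set.mem_ofList]
      constructor
      · rintro ⟨-, h2⟩
        simpa [PySem.Set.contains, PySem.Set.mem_ofList] using h2
      · intro h
        refine ⟨hb a h, ?_⟩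
        simpa [PySem.Set.contains, PySem.Set.mem_ofList] using h
  · exact pvSupportB_pairwise s m

-- sorted(set(...)) of an already reduced strictly increasing list is itself
lemma pvSortedSetIdem (u : List Int) (m : Int)
    (hb : ∀ x ∈ u, 0 ≤ x ∧ x < m) (hp : u.Pairwise (· < ·)) :
    PySem.List.sorted (PySem.Set.ofList (u.map (fun v => PySem.Int.mod v m))) (fun x => x) false = u := by
  rw [pvMapModEq u m hb, PySem.Set.ofList_eq_self_of_nodup u (hp.imp (fun h => ne_of_lt h)),
      PySem.List.sorted_eq_self_of_pairwise u (fun x => x) (hp.imp (fun h => le_of_lt h))]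

lemma pvShfBounds (c : List Int) (low2 : Int) :
    ∀ x ∈ c.map (fun v => (PySem.Int.band (v + low2) 65535) >>> (8:Nat)), 0 ≤ x ∧ x < 256 := by
  intro x hx
  rw [List.mem_map] at hx
  obtain ⟨v, _, rfl⟩ := hx
  exact pvShiftedBounds (v + low2)

lemma pvNibBounds (g : Int → Int) (c : List Int) :
    ∀ x ∈ c.map (fun v => PySem.Int.band (g v) 15), 0 ≤ x ∧ x < 16 := by
  intro x hx
  rw [List.mem_map] at hx
  obtain ⟨v, _, rfl⟩ := hx
  have h := pvBandBounds (g v) 15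
  norm_num at h ⊢
  omega

lemma pvSupportEq (s : List Int) (m : Int) (hb : ∀ x ∈ s, 0 ≤ x ∧ x < m) :
    (pvSupportProfile s m).support = pvSupportB s m := by
  unfold pvSupportProfile
  simp only
  exact pvSupportScan s m hb

-- ---- gap-word machinery (proof-side only) ----

-- adjacent differences, in the zip shape B's port uses
def pvDiffs (w : List Int) : List Int := (List.zip w w.tail).map (fun p => p.2 - p.1)

-- circular gap word of a support, modulus m
def pvGapsOf (w : List Int) (m : Int) : List Int := pvDiffs w ++ [m + w.headD 0 - w.getLastD 0]

-- value rotation: members ≥ w[i] first, smaller members lifted by m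
def pvRotVal (i : Nat) (u : List Int) (m : Int) : List Int := u.drop i ++ (u.take i).map (· + m)

def pvRotL1 (w : List Int) : List Int := w.tail ++ w.take 1
def pvRotM1 (m : Int) (w : List Int) : List Int := w.tail ++ (w.take 1).map (· + m)

-- running prefix sums starting after accumulator c
def pvPsFrom (c : Int) : List Int → List Int
  | [] => []
  | g :: gs => (c + g) :: pvPsFrom (c + g) gs

-- B's final cumulative-sum loop value
def pvG (r : List Int) : List Int := 0 :: pvPsFrom 0 r.dropLast

-- A's best-tracking step and fold
def pvStep (best : Option (List Int)) (c : List Int) : Option (List Int) :=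
  match best with
  | none => some c
  | some b => if c < b then some c else some b

def pvBestFold (cs : List (List Int)) : Option (List Int) := cs.foldl pvStep none

lemma pvDiffs_cons_cons (a b : Int) (t : List Int) :
    pvDiffs (a :: b :: t) = (b - a) :: pvDiffs (b :: t) := by
  simp [pvDiffs]

lemma pvDiffs_append_singleton (w : List Int) (x : Int) (hw : w ≠ []) :
    pvDiffs (w ++ [x]) = pvDiffs w ++ [x - w.getLastD 0] := by
  induction w with
  | nil => exact absurd rfl hw
  | cons a w ih =>
    cases w with
    | nil => simp [pvDiffs]
    | cons b t =>
      rw [show (a :: b :: t) ++ [x] = a :: ((b :: t) ++ [x]) by simp,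
          show ((b :: t) ++ [x] : List Int) = b :: (t ++ [x]) by simp,
          pvDiffs_cons_cons, show (b :: (t ++ [x]) : List Int) = (b :: t) ++ [x] by simp,
          ih (by simp), pvDiffs_cons_cons]
      simp

lemma pvDiffs_length (w : List Int) : (pvDiffs w).length = w.length - 1 := by
  simp [pvDiffs, List.length_zip]

lemma pvGapsOf_length (w : List Int) (m : Int) : (pvGapsOf w m).length = w.length - 1 + 1 := by
  simp [pvGapsOf, pvDiffs_length]

lemma pvDiffs_sum (w : List Int) : (pvDiffs w).sum = w.getLastD 0 - w.headD 0 := by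
  induction w with
  | nil => simp [pvDiffs]
  | cons a w ih =>
    cases w with
    | nil => simp [pvDiffs]
    | cons b t =>
      rw [pvDiffs_cons_cons, List.sum_cons, ih]
      simp

lemma pvGapsOf_sum (w : List Int) (m : Int) : (pvGapsOf w m).sum = m := by
  simp [pvGapsOf, pvDiffs_sum]

lemma pvRotVal_length (i : Nat) (u : List Int) (m : Int) (h : i ≤ u.length) :
    (pvRotVal i u m).length = u.length := by
  simp [pvRotVal]
  omega

lemma pvLastAux (b x : Int) (t : List Int) : ((b :: (t ++ [x])).getLast?).getD 0 = x := by
  rw [show (b :: (t ++ [x])) = (b :: t) ++ [x] by simp, List.getLast?_concat]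
  rfl

lemma pvGapsOf_rotM1 (w : List Int) (m : Int) (hw : w ≠ []) :
    pvGapsOf (pvRotM1 m w) m = pvRotL1 (pvGapsOf w m) := by
  cases w with
  | nil => exact absurd rfl hw
  | cons a w =>
    cases w with
    | nil =>
      simp [pvGapsOf, pvRotM1, pvRotL1, pvDiffs]
    | cons b t =>
      have hbt : (b :: t : List Int) ≠ [] := by simp
      show pvGapsOf ((b :: t) ++ [a + m]) m = pvRotL1 (pvGapsOf (a :: b :: t) m)
      unfold pvGapsOf
      rw [pvDiffs_append_singleton (b :: t) (a + m) hbt, pvDiffs_cons_cons]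
      unfold pvRotL1
      simp [pvLastAux]
      try constructor
      all_goals ring

lemma pvDropTake_rot (g : List Int) (i : Nat) (h : i < g.length) :
    g.drop (i+1) ++ g.take (i+1) = pvRotL1 (g.drop i ++ g.take i) := by
  rw [List.take_succ_eq_append_getElem h, List.drop_eq_getElem_cons h]
  unfold pvRotL1
  simp only [List.cons_append, List.tail_cons, List.take_succ_cons, List.take_zero,
    List.append_assoc]

lemma pvRotVal_succ (i : Nat) (u : List Int) (m : Int) (h : i < u.length) :
    pvRotVal (i+1) u m = pvRotM1 m (pvRotVal i u m) := by
  unfold pvRotVal pvRotM1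
  rw [List.take_succ_eq_append_getElem h, List.drop_eq_getElem_cons h]
  simp only [List.cons_append, List.tail_cons, List.take_succ_cons, List.take_zero,
    List.map_cons, List.map_nil, List.map_append, List.append_assoc]

lemma pvRot_gapsOf (u : List Int) (m : Int) (hu : u ≠ []) :
    ∀ i, i < u.length →
      (pvGapsOf u m).drop i ++ (pvGapsOf u m).take i = pvGapsOf (pvRotVal i u m) m := by
  intro i
  induction i with
  | zero => intro _; simp [pvRotVal]
  | succ i ih =>
    intro hi
    have hi' : i < u.length := Nat.lt_of_succ_lt hi
    have hlen : i < (pvGapsOf u m).length := by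
      rw [pvGapsOf_length]
      have := List.length_pos_of_ne_nil hu
      omega
    rw [pvDropTake_rot _ i hlen, ih hi', pvRotVal_succ i u m hi',
        pvGapsOf_rotM1 _ m (by
          have : (pvRotVal i u m).length = u.length := pvRotVal_length i u m (Nat.le_of_lt hi')
          intro hnil
          rw [hnil] at this
          simp at this
          exact hu (List.eq_nil_of_length_eq_zero this.symm))]

lemma pvPsFoldl (gs : List Int) (out : List Int) (c : Int) :
    (gs.foldl (fun (st : List Int × Int) g => (st.1 ++ [st.2 + g], st.2 + g)) (out, c)).1
      = out ++ pvPsFrom c gs := by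
  induction gs generalizing out c with
  | nil => simp [pvPsFrom]
  | cons g gs ih => simp [pvPsFrom, ih]

lemma pvPsFrom_diffs (w : List Int) : ∀ (a c : Int),
    pvPsFrom c (pvDiffs (a :: w)) = w.map (fun v => v - a + c) := by
  induction w with
  | nil => intro a c; simp [pvDiffs, pvPsFrom]
  | cons b t ih =>
    intro a c
    rw [pvDiffs_cons_cons]
    unfold pvPsFrom
    rw [ih b (c + (b - a))]
    have hf : (fun v => v - b + (c + (b - a))) = fun v : Int => v - a + c :=
      funext (fun v => by ring)
    rw [hf]
    congr 1
    ring

lemma pvG_gapsOf (w : List Int) (m : Int) (hw : w ≠ []) :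
    pvG (pvGapsOf w m) = w.map (fun v => v - w.headD 0) := by
  cases w with
  | nil => exact absurd rfl hw
  | cons a t =>
    unfold pvG pvGapsOf
    rw [List.dropLast_concat]
    rw [pvPsFrom_diffs t a 0]
    simp [List.map_cons]

-- first-difference lex monotonicity of prefix sums
lemma pvPsFrom_lt_iff : ∀ (xs ys : List Int) (c : Int), xs.length = ys.length →
    (pvPsFrom c xs < pvPsFrom c ys ↔ xs < ys) := by
  intro xs
  induction xs with
  | nil =>
    intro ys c h
    cases ys with
    | nil => simp [pvPsFrom]
    | cons y ys => simp at h
  | cons x xs ih =>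
    intro ys c h
    cases ys with
    | nil => simp at h
    | cons y ys =>
      simp only [List.length_cons, Nat.succ.injEq] at h
      unfold pvPsFrom
      rw [List.cons_lt_cons_iff, List.cons_lt_cons_iff]
      constructor
      · rintro (h1 | ⟨h1, h2⟩)
        · left; omega
        · right
          have hxy : x = y := by omega
          subst hxy
          exact ⟨rfl, (ih ys (c + x) h).mp h2⟩
      · rintro (h1 | ⟨h1, h2⟩)
        · left; omega
        · subst h1
          exact Or.inr ⟨rfl, (ih ys (c + x) h).mpr h2⟩

-- append of a sum-determined last element preserves/reflects lex order
lemma pvAppend_lt_iff : ∀ (xs ys : List Int) (x y : Int), xs.length = ys.length →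
    xs.sum + x = ys.sum + y → (xs ++ [x] < ys ++ [y] ↔ xs < ys) := by
  intro xs
  induction xs with
  | nil =>
    intro ys x y h hs
    cases ys with
    | nil =>
      simp at hs
      subst hs
      simp
    | cons b ys => simp at h
  | cons a xs ih =>
    intro ys x y h hs
    cases ys with
    | nil => simp at h
    | cons b ys =>
      simp only [List.length_cons, Nat.succ.injEq] at h
      simp only [List.sum_cons] at hs
      rw [List.cons_append, List.cons_append, List.cons_lt_cons_iff, List.cons_lt_cons_iff]
      constructor
      · rintro (h1 | ⟨h1, h2⟩)
        · exact Or.inl h1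
        · subst h1
          exact Or.inr ⟨rfl, (ih ys x y h (by omega)).mp h2⟩
      · rintro (h1 | ⟨h1, h2⟩)
        · exact Or.inl h1
        · subst h1
          exact Or.inr ⟨rfl, (ih ys x y h (by omega)).mpr h2⟩

-- pvG is strictly monotone on equal-length, equal-sum, nonempty gap words
lemma pvG_lt_iff (r s : List Int) (hr : r ≠ []) (hs : s ≠ [])
    (hlen : r.length = s.length) (hsum : r.sum = s.sum) :
    (pvG r < pvG s ↔ r < s) := by
  unfold pvG
  rw [List.cons_lt_cons_iff]
  have hlen' : r.dropLast.length = s.dropLast.length := by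
    simp [List.length_dropLast, hlen]
  have h1 : pvPsFrom 0 r.dropLast < pvPsFrom 0 s.dropLast ↔ r.dropLast < s.dropLast :=
    pvPsFrom_lt_iff _ _ 0 hlen'
  have h2 : r.dropLast ++ [r.getLast hr] < s.dropLast ++ [s.getLast hs] ↔ r.dropLast < s.dropLast := by
    apply pvAppend_lt_iff _ _ _ _ hlen'
    have hr' := List.dropLast_concat_getLast hr
    have hs' := List.dropLast_concat_getLast hs
    have : (r.dropLast ++ [r.getLast hr]).sum = (s.dropLast ++ [s.getLast hs]).sum := by
      rw [hr', hs', hsum]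
    simpa using this
  rw [List.dropLast_concat_getLast hr, List.dropLast_concat_getLast hs] at h2
  constructor
  · rintro (h | ⟨-, h⟩)
    · exact absurd h (lt_irrefl _)
    · exact h2.mpr ((h1).mp h)
  · intro h
    exact Or.inr ⟨rfl, h1.mpr (h2.mp h)⟩

lemma pvBestFoldAux : ∀ (cs : List (List Int)) (b : List Int),
    ∃ r, cs.foldl pvStep (some b) = some r ∧ (r = b ∨ r ∈ cs) ∧ r ≤ b ∧ ∀ y ∈ cs, r ≤ y := by
  intro cs
  induction cs with
  | nil => intro b; exact ⟨b, rfl, Or.inl rfl, le_refl b, by simp⟩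
  | cons c cs ih =>
    intro b
    by_cases hc : c < b
    · obtain ⟨r, h1, h2, h3, h4⟩ := ih c
      refine ⟨r, ?_, ?_, le_trans h3 (le_of_lt hc), ?_⟩
      · simpa [pvStep, hc] using h1
      · rcases h2 with h | h
        · exact Or.inr (by simp [h])
        · exact Or.inr (by simp [h])
      · intro y hy
        rcases List.mem_cons.mp hy with rfl | hy
        · exact h3
        · exact h4 y hy
    · obtain ⟨r, h1, h2, h3, h4⟩ := ih b
      refine ⟨r, ?_, ?_, h3, ?_⟩
      · simpa [pvStep, hc] using h1
      · rcases h2 with h | h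
        · exact Or.inl h
        · exact Or.inr (by simp [h])
      · intro y hy
        rcases List.mem_cons.mp hy with rfl | hy
        · exact le_trans h3 (not_lt.mp hc)
        · exact h4 y hy

lemma pvBestFold_spec (cs : List (List Int)) (hcs : cs ≠ []) :
    ∃ r, pvBestFold cs = some r ∧ r ∈ cs ∧ ∀ y ∈ cs, r ≤ y := by
  cases cs with
  | nil => exact absurd rfl hcs
  | cons c cs =>
    obtain ⟨r, h1, h2, h3, h4⟩ := pvBestFoldAux cs c
    refine ⟨r, ?_, ?_, ?_⟩
    · simpa [pvBestFold, pvStep] using h1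
    · rcases h2 with h | h
      · simp [h]
      · simp [h]
    · intro y hy
      rcases List.mem_cons.mp hy with rfl | hy
      · exact h3
      · exact h4 y hy

lemma pvTake_lt (u : List Int) (hp : u.Pairwise (· < ·)) (i : Nat) (hi : i < u.length) :
    ∀ v ∈ u.take i, v < u[i] := by
  intro v hv
  obtain ⟨j, hj, hje⟩ := List.getElem_of_mem hv
  have hj' : j < i := by
    have := hj
    simp [List.length_take] at this
    omega
  have hjl : j < u.length := by omega
  rw [List.getElem_take] at hje
  rw [← hje]
  exact List.pairwise_iff_getElem.mp hp j i hjl hi hj'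

lemma pvDrop_le (u : List Int) (hp : u.Pairwise (· < ·)) (i : Nat) (hi : i < u.length) :
    ∀ v ∈ u.drop i, u[i] ≤ v := by
  intro v hv
  obtain ⟨j, hj, hje⟩ := List.getElem_of_mem hv
  have hjl : i + j < u.length := by
    have := hj
    simp [List.length_drop] at this
    omega
  rw [List.getElem_drop] at hje
  rcases Nat.eq_zero_or_pos j with rfl | hpos
  · have : u[i] = v := by simpa using hje
    exact this.le
  · have hlt := List.pairwise_iff_getElem.mp hp i (i + j) hi hjl (by omega)
    rw [hje] at hlt
    exact le_of_lt hlt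

-- each of A's per-base candidates, sorted, is the shifted value rotation
lemma pvCandSorted (u : List Int) (m : Int) (i : Nat) (hi : i < u.length)
    (hb : ∀ x ∈ u, 0 ≤ x ∧ x < m) (hp : u.Pairwise (· < ·)) :
    PySem.List.sorted (u.map (fun v => PySem.Int.mod (v - u[i]) m)) (fun x => x) false
      = (pvRotVal i u m).map (fun v => v - u[i]) := by
  obtain ⟨b, hbdef⟩ : ∃ b, u[i] = b := ⟨u[i], rfl⟩
  rw [hbdef]
  have hbm : 0 ≤ b ∧ b < m := by
    rw [← hbdef]
    exact hb u[i] (List.getElem_mem hi)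
  apply PySem.List.sorted_eq_of_perm_of_pairwise_lt
  · have hmap : u.map (fun v => PySem.Int.mod (v - b) m)
        = (u.take i).map (fun v => v + m - b) ++ (u.drop i).map (fun v => v - b) := by
      conv_lhs => rw [← List.take_append_drop i u]
      rw [List.map_append]
      congr 1
      · apply List.map_congr_left
        intro v hv
        have h1 : v < b := hbdef ▸ pvTake_lt u hp i hi v hv
        have h2 := hb v (List.mem_of_mem_take hv)
        rw [pvModShift (v - b) m (by omega) (by omega)]
        ring
      · apply List.map_congr_left
        intro v hv
        have h1 : b ≤ v := hbdef ▸ pvDrop_le u hp i hi v hv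
        have h2 := hb v (List.mem_of_mem_drop hv)
        exact pvModId (v - b) m (by omega) (by omega)
    rw [hmap]
    unfold pvRotVal
    rw [List.map_append, List.map_map]
    have hc : ((u.take i).map ((fun v => v - b) ∘ (· + m))) = (u.take i).map (fun v => v + m - b) :=
      List.map_congr_left (fun v _ => by simp [Function.comp])
    rw [hc]
    exact List.perm_append_comm
  · rw [List.pairwise_map]
    have hrv : (pvRotVal i u m).Pairwise (· < ·) := by
      unfold pvRotVal
      rw [List.pairwise_append]
      refine ⟨hp.sublist (List.drop_sublist i u), ?_, ?_⟩
      · rw [List.pairwise_map]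
        exact (hp.sublist (List.take_sublist i u)).imp (by intro a b h; omega)
      · intro x hx y hy
        rw [List.mem_map] at hy
        obtain ⟨w, hw, rfl⟩ := hy
        have h2 := hb x (List.mem_of_mem_drop hx)
        have h3 := hb w (List.mem_of_mem_take hw)
        omega
    exact hrv.imp (by intro a b h; omega)

-- A's let-candidate best-tracking loop over bases is pvBestFold over the candidate list
lemma pvFoldMatch (l : List Int) (f : Int → List Int) :
    l.foldl (fun (best : Option (List Int)) base =>
      match best with
      | none => some (f base)
      | some b => if f base < b then some (f base) else some b) none
    = pvBestFold (l.map f) := by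
  rw [pvBestFold, List.foldl_map]
  rfl

-- the canonical-shift computations agree on a strictly increasing support in [0, m)
lemma pvCanonMain (u : List Int) (m : Int) (_hm : 0 < m)
    (hb : ∀ x ∈ u, 0 ≤ x ∧ x < m) (hp : u.Pairwise (· < ·)) :
    pvCanonicalShiftTuple u m = pvCanonicalB u m := by
  unfold pvCanonicalShiftTuple pvCanonicalB
  dsimp only
  rw [pvSortedSetIdem u m hb hp]
  by_cases hu : u = []
  · simp [hu]
  · simp only [if_neg hu]
    have hk : 0 < u.length := List.length_pos_of_ne_nil hu
    -- B's gap expression is the circular gap word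
    have h0 : (PySem.List.pyGet? u 0).getD 0 = u.headD 0 := by
      cases u with
      | nil => rfl
      | cons a t => simp
    have h1 : (PySem.List.pyGet? u (-1)).getD 0 = u.getLastD 0 := by
      rw [PySem.List.pyGet?_neg_one]
      cases u with
      | nil => rfl
      | cons a t => simp [List.getLastD_eq_getLast?]
    have hgaps : ((List.zip u (PySem.List.slice u (some 1) none)).map (fun p => p.2 - p.1))
        ++ [m + (PySem.List.pyGet? u 0).getD 0 - (PySem.List.pyGet? u (-1)).getD 0]
        = pvGapsOf u m := by
      unfold pvGapsOf pvDiffs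
      rw [PySem.List.slice_from_one, h0, h1]
    rw [hgaps]
    have hlen : (pvGapsOf u m).length = u.length := by
      rw [pvGapsOf_length]
      omega
    have hrots : ((PySem.List.pyRange 0 (((pvGapsOf u m).length : Nat) : Int) 1).map (fun i =>
          PySem.List.slice (pvGapsOf u m) (some i) none ++ PySem.List.slice (pvGapsOf u m) none (some i)))
        = (List.range u.length).map (fun j => pvGapsOf (pvRotVal j u m) m) := by
      rw [PySem.List.pyRange_one, hlen, List.map_map]
      simp only [Int.sub_zero, Int.toNat_natCast]
      apply List.map_congr_left
      intro j hj
      have hj' : j < u.length := List.mem_range.mp hj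
      simp only [Function.comp, zero_add]
      rw [PySem.List.slice_from_natCast, PySem.List.slice_to_natCast]
      exact pvRot_gapsOf u m hu j hj'
    rw [hrots]
    rw [pvFoldMatch u (fun base => PySem.List.sorted (u.map (fun v => PySem.Int.mod (v - base) m)) (fun x => x) false)]
    -- the candidate lists coincide
    have hcand : u.map (fun base => PySem.List.sorted (u.map (fun v => PySem.Int.mod (v - base) m)) (fun x => x) false)
        = ((List.range u.length).map (fun j => pvGapsOf (pvRotVal j u m) m)).map pvG := by
      rw [List.map_map]
      apply List.ext_getElem (by simp)
      intro n h1' h2'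
      have hn : n < u.length := by simpa using h1'
      rw [List.getElem_map, List.getElem_map, List.getElem_range]
      simp only [Function.comp]
      rw [pvCandSorted u m n hn hb hp]
      have hne : pvRotVal n u m ≠ [] := by
        intro hnil
        have := pvRotVal_length n u m (le_of_lt hn)
        rw [hnil] at this
        simp at this
        omega
      rw [pvG_gapsOf _ m hne]
      have hhead : (pvRotVal n u m).headD 0 = u[n] := by
        unfold pvRotVal
        rw [List.drop_eq_getElem_cons hn, List.cons_append]
        rfl
      rw [hhead]
    rw [hcand]
    -- now both sides are a minimum computation over the rotation list
    set rots := (List.range u.length).map (fun j => pvGapsOf (pvRotVal j u m) m) with hrotsdef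
    have hrne : rots ≠ [] := by
      rw [hrotsdef]
      simp only [ne_eq, List.map_eq_nil_iff, List.range_eq_nil]
      omega
    have hprops : ∀ r ∈ rots, r ≠ [] ∧ r.length = u.length ∧ r.sum = m := by
      intro r hr
      rw [hrotsdef, List.mem_map] at hr
      obtain ⟨j, hj, rfl⟩ := hr
      have hj' : j < u.length := List.mem_range.mp hj
      have hl : (pvGapsOf (pvRotVal j u m) m).length = u.length := by
        rw [pvGapsOf_length, pvRotVal_length j u m (le_of_lt hj')]
        omega
      refine ⟨?_, hl, pvGapsOf_sum _ m⟩
      intro h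
      rw [h] at hl
      simp at hl
      omega
    have hmono : ∀ r ∈ rots, ∀ s ∈ rots, (pvG r < pvG s ↔ r < s) := by
      intro r hr s hs
      exact pvG_lt_iff r s (hprops r hr).1 (hprops s hs).1
        (by rw [(hprops r hr).2.1, (hprops s hs).2.1])
        (by rw [(hprops r hr).2.2, (hprops s hs).2.2])
    have hminB : PySem.List.min? rots (fun x => x) = pvBestFold rots := by
      unfold PySem.List.min? pvBestFold
      congr 1
      funext acc x
      cases acc with
      | none => rfl
      | some b => rfl
    obtain ⟨rmin, hrmin, hrmem, hrle⟩ := pvBestFold_spec rots hrne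
    obtain ⟨rstar, hfold, hmem, hle⟩ := pvBestFold_spec (rots.map pvG) (by simp [hrne])
    obtain ⟨a, ha, rfl⟩ := List.mem_map.mp hmem
    have h1' : pvG a ≤ pvG rmin := hle _ (List.mem_map_of_mem hrmem)
    have h2' : pvG rmin ≤ pvG a := by
      by_contra hcon
      have hlt : pvG a < pvG rmin := not_le.mp hcon
      have : a < rmin := (hmono a ha rmin hrmem).mp hlt
      exact absurd this (not_lt.mpr (hrle a ha))
    have hstar : pvG a = pvG rmin := le_antisymm h1' h2'
    rw [hfold, hminB, hrmin]
    simp only [Option.getD_some]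
    rw [PySem.List.slice_to_neg_one, pvPsFoldl]
    rw [hstar]
    rfl

-- ===== VERDICT (by name: the statement is the Claim_ definition above) =====
theorem extract_upper_transport_signature_spec : Claim_equal_extract_upper_transport_signature := by
  intro table low _
  unfold Spec_extract_upper_transport_signature
  unfold extract_upper_transport_signature extract_upper_transport_signature_alt
  dsimp only
  rw [PySem.List.foldl_prod_mk
      (f := fun (acc : List PvProfile) (row : List Int) =>
        acc ++ [pvSupportProfile (row.map (fun v => (PySem.Int.band (v + PySem.Int.band low 255) 65535) >>> (8:Nat))) 256])
      (g := fun (acc : List PvProfile) (row : List Int) =>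
        acc ++ [pvSupportProfile ((row.map (fun v => (PySem.Int.band (v + PySem.Int.band low 255) 65535) >>> (8:Nat))).map (fun v => PySem.Int.band v 15)) 16])]
  simp only [PySem.List.foldl_append_singleton_eq_map, List.nil_append, List.map_map]
  simp only [Function.comp_def]
  have hU : ∀ c : List Int, (pvSupportProfile (List.map (fun v => PySem.Int.band (v + PySem.Int.band low 255) 65535 >>> (8:Nat)) c) 256).support
      = pvSupportB (List.map (fun v => PySem.Int.band (v + PySem.Int.band low 255) 65535 >>> (8:Nat)) c) 256 :=
    fun c => pvSupportEq _ 256 (pvShfBounds c _)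
  have hUc : ∀ c : List Int, pvCanonicalShiftTuple (pvSupportB (List.map (fun v => PySem.Int.band (v + PySem.Int.band low 255) 65535 >>> (8:Nat)) c) 256) 256
      = pvCanonicalB (pvSupportB (List.map (fun v => PySem.Int.band (v + PySem.Int.band low 255) 65535 >>> (8:Nat)) c) 256) 256 :=
    fun c => pvCanonMain _ 256 (by norm_num) (pvSupportB_bounds _ _) (pvSupportB_pairwise _ _)
  have hL : ∀ c : List Int, (pvSupportProfile (List.map (fun v => PySem.Int.band ((fun v => PySem.Int.band (v + PySem.Int.band low 255) 65535 >>> (8:Nat)) v) 15) c) 16).support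
      = pvSupportB (List.map (fun v => PySem.Int.band ((fun v => PySem.Int.band (v + PySem.Int.band low 255) 65535 >>> (8:Nat)) v) 15) c) 16 :=
    fun c => pvSupportEq _ 16 (pvNibBounds _ c)
  have hLc : ∀ c : List Int, pvCanonicalShiftTuple (pvSupportB (List.map (fun v => PySem.Int.band ((fun v => PySem.Int.band (v + PySem.Int.band low 255) 65535 >>> (8:Nat)) v) 15) c) 16) 16
      = pvCanonicalB (pvSupportB (List.map (fun v => PySem.Int.band ((fun v => PySem.Int.band (v + PySem.Int.band low 255) 65535 >>> (8:Nat)) v) 15) c) 16) 16 :=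
    fun c => pvCanonMain _ 16 (by norm_num) (pvSupportB_bounds _ _) (pvSupportB_pairwise _ _)
  simp only [hU, hUc, hL, hLc, List.map_map, Function.comp_def]
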